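-- pv_equiv track=rewrite | github.com/jeremyc1ark/AOC | day9.py | part_1
-- ===== SOURCE A (Python) =====
-- from itertools import combinations
--
-- def part_1(input_data, index=25):
--     current = input_data[index]
--     preamble = input_data[index-25:index]
--     combos = combinations(preamble, 2)
--     for combo in combos:
--         if sum(combo) == current:
--             return part_1(input_data, index+1)
--     return current
-- ===== SOURCE B (Python) =====
-- def part_1(input_data, index=25):
--     # Iterative two-sum scan instead of recursion + pairwise combinations.
--     i = index
--     while True:
--         current = input_data[i]
--         seen = set()
--         for x in input_data[i-25:i]:
--             if current - x in seen:
--                 break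
--             seen.add(x)
--         else:
--             return current
--         i += 1
-- ===== Notes on version B (the rewrite author's own statement) =====
-- stated objective: simpler
-- what changed: Replaces the tail recursion plus quadratic combinations() pair enumeration with a plain iterative while-loop and a single-pass set-based two-sum scan over the 25-element window.
import Mathlib
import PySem

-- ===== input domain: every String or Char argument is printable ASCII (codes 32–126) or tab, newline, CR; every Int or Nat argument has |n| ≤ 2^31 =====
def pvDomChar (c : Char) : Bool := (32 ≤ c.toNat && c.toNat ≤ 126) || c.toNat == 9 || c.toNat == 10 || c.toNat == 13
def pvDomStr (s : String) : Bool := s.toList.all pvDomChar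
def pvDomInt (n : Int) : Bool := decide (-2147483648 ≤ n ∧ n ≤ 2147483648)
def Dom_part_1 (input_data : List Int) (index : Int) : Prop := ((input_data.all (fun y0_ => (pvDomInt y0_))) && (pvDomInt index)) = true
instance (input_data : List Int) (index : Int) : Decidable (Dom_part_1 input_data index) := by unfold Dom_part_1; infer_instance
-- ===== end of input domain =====

-- B replaces A's tail recursion + combinations() pair enumeration with an iterative
-- loop and a set-based two-sum scan of the window (simpler; same return values).

-- ===== PORT A =====
-- 'for combo in combinations(preamble, 2): if sum(combo) == current: …' — pairs in
-- combinations order, early exit on first hit (existence is all that is used).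
def anyPairSum (xs : List Int) (t : Int) : Bool :=
  match xs with
  | [] => false
  | x :: rest => rest.any (fun y => x + y == t) || anyPairSum rest t

def part_1 (input_data : List Int) (index : Int) : Int :=
  match h : PySem.List.pyGet? input_data index with
  | none => 0   -- IndexError in Python; excluded by Pre_part_1
  | some current =>
    if anyPairSum (PySem.List.slice input_data (some (index - 25)) (some index)) current then
      part_1 input_data (index + 1)
    else
      current
termination_by ((input_data.length : Int) + 1 - index).toNat
decreasing_by
  have hin : PySem.Raise.InRange input_data.length index := by
    by_contra hc
    rw [← PySem.List.pyGet?_eq_none_iff (xs := input_data)] at hc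
    simp [hc] at h
  unfold PySem.Raise.InRange at hin
  omega

-- ===== PORT B =====
-- 'for x in window: if current - x in seen: break; seen.add(x)  else: return current'
def twoSumHit (window : List Int) (current : Int) (seen : PySem.Set Int) : Bool :=
  match window with
  | [] => false
  | x :: rest =>
    if PySem.Set.contains seen (current - x) then true
    else twoSumHit rest current (PySem.Set.add seen x)

-- the 'while True' loop; fuel bounds the number of iterations until i walks off the end
def altLoop (input_data : List Int) : Nat → Int → Int
  | 0, _ => 0
  | fuel + 1, i =>
    match PySem.List.pyGet? input_data i with
    | none => 0   -- IndexError in Python; excluded by Pre_part_1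
    | some current =>
      if twoSumHit (PySem.List.slice input_data (some (i - 25)) (some i)) current PySem.Set.empty then
        altLoop input_data fuel (i + 1)
      else
        current

def part_1_alt (input_data : List Int) (index : Int) : Int :=
  altLoop input_data (((input_data.length : Int) - index).toNat + 1) index

-- ===== PRECONDITION & SPEC =====
-- Pre_ excludes exactly the inputs on which A raises IndexError: the start index must not
-- be below -len, and some position from index to the end must fail the pair-sum test.
def Pre_part_1 (input_data : List Int) (index : Int) : Prop :=
  -(input_data.length : Int) ≤ index ∧
  ∃ k < ((input_data.length : Int) - index).toNat,
    ¬ ∃ q < (PySem.List.slice input_data (some (index + k - 25)) (some (index + k))).length,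
      ∃ p < q,
        (PySem.List.slice input_data (some (index + k - 25)) (some (index + k))).getD p 0 +
        (PySem.List.slice input_data (some (index + k - 25)) (some (index + k))).getD q 0 =
        PySem.List.pyGetD input_data (index + k) 0

instance (input_data : List Int) (index : Int) : Decidable (Pre_part_1 input_data index) := by
  unfold Pre_part_1; infer_instance

def pvWitness_part_1 : List Int × Int := ([1, 2, 3], 0)

def Spec_part_1 (input_data : List Int) (index : Int) (out : Int) : Prop := out = part_1_alt input_data index
instance (input_data : List Int) (index : Int) (out : Int) : Decidable (Spec_part_1 input_data index out) := by unfold Spec_part_1; infer_instance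

-- ===== CLAIM (what is proved, stated in full; the proofs are below) =====
def Claim_equal_part_1 : Prop := ∀ (input_data : List Int) (index : Int), Dom_part_1 input_data index → Pre_part_1 input_data index → Spec_part_1 input_data index (part_1 input_data index)

-- ===== LEMMAS AND PROOFS =====

theorem contains_add (s : PySem.Set Int) (x z : Int) :
    PySem.Set.contains (PySem.Set.add s x) z = (PySem.Set.contains s z || z == x) := by
  rw [Bool.eq_iff_iff]
  simp [PySem.Set.mem_add]

theorem twoSumHit_eq (t : Int) (xs : List Int) : ∀ s : PySem.Set Int,
    twoSumHit xs t s = (xs.any (fun y => PySem.Set.contains s (t - y)) || anyPairSum xs t) := by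
  induction xs with
  | nil => intro s; simp [twoSumHit, anyPairSum]
  | cons x rest ih =>
    intro s
    rw [twoSumHit, anyPairSum, ih, Bool.eq_iff_iff]
    have hsub : ∀ y : ℤ, t - y = x ↔ x + y = t := fun y => by omega
    split_ifs with hx
    · rw [PySem.Set.contains_iff] at hx
      simp only [List.any_cons, List.any_eq_true, Bool.or_eq_true, PySem.Set.contains_iff]
      simp [hx]
    · rw [PySem.Set.contains_iff] at hx
      simp only [List.any_cons, contains_add, List.any_eq_true, Bool.or_eq_true, beq_iff_eq,
        PySem.Set.contains_iff, hsub]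
      constructor
      · rintro (⟨y, hy, h | h⟩ | h)
        · exact Or.inl (Or.inr ⟨y, hy, h⟩)
        · exact Or.inr (Or.inl ⟨y, hy, h⟩)
        · exact Or.inr (Or.inr h)
      · rintro ((h | ⟨y, hy, h⟩) | ⟨y, hy, h⟩ | h)
        · exact absurd h hx
        · exact Or.inl ⟨y, hy, Or.inl h⟩
        · exact Or.inl ⟨y, hy, Or.inr h⟩
        · exact Or.inr h

theorem twoSumHit_empty (t : Int) (xs : List Int) :
    twoSumHit xs t PySem.Set.empty = anyPairSum xs t := by
  rw [twoSumHit_eq]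
  simp [PySem.Set.empty]

theorem altLoop_eq (xs : List Int) : ∀ (fuel : Nat) (i : Int),
    ((xs.length : Int) - i).toNat + 1 ≤ fuel → altLoop xs fuel i = part_1 xs i := by
  intro fuel
  induction fuel with
  | zero => intro i h; omega
  | succ n ih =>
    intro i h
    rw [altLoop, part_1]
    cases hg : PySem.List.pyGet? xs i with
    | none => rfl
    | some current =>
      have hin : PySem.Raise.InRange xs.length i := by
        by_contra hc
        rw [← PySem.List.pyGet?_eq_none_iff (xs := xs)] at hc
        simp [hc] at hg
      unfold PySem.Raise.InRange at hin
      simp only [twoSumHit_empty]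
      by_cases hp : anyPairSum (PySem.List.slice xs (some (i - 25)) (some i)) current = true
      · simp only [hp, if_true]
        exact ih (i + 1) (by omega)
      · simp only [Bool.not_eq_true] at hp
        simp [hp]

theorem part_1_alt_eq (xs : List Int) (i : Int) : part_1_alt xs i = part_1 xs i := by
  exact altLoop_eq xs _ i (le_refl _)

-- ===== VERDICT (by name: the statement is the Claim_ definition above) =====
theorem part_1_spec : Claim_equal_part_1 := by
  intro input_data index _ _
  unfold Spec_part_1
  rw [part_1_alt_eq]
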